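-- pv_equiv track=rewrite | github.com/an0mium/aragora | aragora/compat/openclaw/next_steps_runner.py | _infer_issue_category
-- ===== SOURCE A (Python) =====
-- def _infer_issue_category(labels: list[str]) -> str:
--     """Infer category from GitHub issue labels."""
--     label_lower = [lb.lower() for lb in labels]
--     if any("bug" in lb for lb in label_lower):
--         return "bug"
--     if any("security" in lb for lb in label_lower):
--         return "security"
--     if any("doc" in lb for lb in label_lower):
--         return "docs"
--     if any("enhancement" in lb or "feature" in lb for lb in label_lower):
--         return "enhancement"
--     if any("tech-debt" in lb or "refactor" in lb for lb in label_lower):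
--         return "tech-debt"
--     return "enhancement"
-- ===== SOURCE B (Python) =====
-- _KEYWORDS = [
--     ("bug", "bug"),
--     ("security", "security"),
--     ("doc", "docs"),
--     ("enhancement", "enhancement"),
--     ("feature", "enhancement"),
--     ("tech-debt", "tech-debt"),
--     ("refactor", "tech-debt"),
-- ]
--
-- _PRIORITY = ["bug", "security", "docs", "enhancement", "tech-debt"]
--
--
-- def _infer_issue_category(labels: list[str]) -> str:
--     """Infer category from GitHub issue labels."""
--     found = set()
--     for lb in labels:
--         low = lb.lower()
--         for kw, cat in _KEYWORDS:
--             if kw in low: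
--                 found.add(cat)
--     for cat in _PRIORITY:
--         if cat in found:
--             return cat
--     return "enhancement"
-- ===== Notes on version B (the rewrite author's own statement) =====
-- stated objective: alternative
-- what changed: Replaced the chain of per-category any() scans with a single keyword-table collection pass building a set of matched categories, followed by a separate fixed-priority resolution pass.
import Mathlib
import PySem

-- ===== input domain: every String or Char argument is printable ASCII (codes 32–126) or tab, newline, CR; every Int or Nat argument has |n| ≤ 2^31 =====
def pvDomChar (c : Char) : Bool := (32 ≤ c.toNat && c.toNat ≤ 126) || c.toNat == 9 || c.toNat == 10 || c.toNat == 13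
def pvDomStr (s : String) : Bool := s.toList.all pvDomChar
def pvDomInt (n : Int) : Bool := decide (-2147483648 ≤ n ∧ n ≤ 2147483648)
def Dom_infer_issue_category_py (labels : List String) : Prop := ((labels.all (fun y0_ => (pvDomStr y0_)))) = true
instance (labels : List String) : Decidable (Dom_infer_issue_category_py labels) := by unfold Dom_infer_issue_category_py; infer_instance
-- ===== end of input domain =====

-- B replaces the chain of per-category any() scans with one keyword-table collection
-- pass into a set plus a separate fixed-priority resolution pass (objective: alternative).


-- ===== PORT A =====
def infer_issue_category_py (labels : List String) : String :=
  let label_lower := labels.map PySem.Str.lower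
  if label_lower.any (fun lb => PySem.Str.isIn "bug" lb) then "bug"
  else if label_lower.any (fun lb => PySem.Str.isIn "security" lb) then "security"
  else if label_lower.any (fun lb => PySem.Str.isIn "doc" lb) then "docs"
  else if label_lower.any (fun lb => PySem.Str.isIn "enhancement" lb || PySem.Str.isIn "feature" lb) then "enhancement"
  else if label_lower.any (fun lb => PySem.Str.isIn "tech-debt" lb || PySem.Str.isIn "refactor" lb) then "tech-debt"
  else "enhancement"

-- ===== PORT B =====
def pvKeywords : List (String × String) :=
  [("bug", "bug"), ("security", "security"), ("doc", "docs"),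
   ("enhancement", "enhancement"), ("feature", "enhancement"),
   ("tech-debt", "tech-debt"), ("refactor", "tech-debt")]

def pvPriority : List String := ["bug", "security", "docs", "enhancement", "tech-debt"]

-- the inner 'for kw, cat in _KEYWORDS' loop body applied to one label
def pvStep (s : PySem.Set String) (lb : String) : PySem.Set String :=
  let low := PySem.Str.lower lb
  pvKeywords.foldl (fun s kc => if PySem.Str.isIn kc.1 low then PySem.Set.add s kc.2 else s) s

-- the 'for cat in _PRIORITY: if cat in found: return cat' loop
def pvResolve (found : PySem.Set String) : List String → String
  | [] => "enhancement"
  | c :: rest => if PySem.Set.contains found c then c else pvResolve found rest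

def infer_issue_category_py_alt (labels : List String) : String :=
  let found := labels.foldl pvStep PySem.Set.empty
  pvResolve found pvPriority

-- ===== PRECONDITION & SPEC =====
def Spec_infer_issue_category_py (labels : List String) (out : String) : Prop := out = infer_issue_category_py_alt labels
instance (labels : List String) (out : String) : Decidable (Spec_infer_issue_category_py labels out) := by unfold Spec_infer_issue_category_py; infer_instance

-- ===== CLAIM (what is proved, stated in full; the proofs are below) =====
def Claim_equal_infer_issue_category_py : Prop := ∀ (labels : List String), Dom_infer_issue_category_py labels → Spec_infer_issue_category_py labels (infer_issue_category_py labels)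

-- ===== LEMMAS AND PROOFS =====

-- what pvStep can contribute for one label lb (one disjunct per keyword, in table order)
def pvCond (lb y : String) : Prop :=
  (PySem.Str.isIn "bug" (PySem.Str.lower lb) = true ∧ y = "bug") ∨
  (PySem.Str.isIn "security" (PySem.Str.lower lb) = true ∧ y = "security") ∨
  (PySem.Str.isIn "doc" (PySem.Str.lower lb) = true ∧ y = "docs") ∨
  (PySem.Str.isIn "enhancement" (PySem.Str.lower lb) = true ∧ y = "enhancement") ∨
  (PySem.Str.isIn "feature" (PySem.Str.lower lb) = true ∧ y = "enhancement") ∨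
  (PySem.Str.isIn "tech-debt" (PySem.Str.lower lb) = true ∧ y = "tech-debt") ∨
  (PySem.Str.isIn "refactor" (PySem.Str.lower lb) = true ∧ y = "tech-debt")

lemma mem_add_if (c : Bool) (s : PySem.Set String) (v y : String) :
    y ∈ (if c then PySem.Set.add s v else s) ↔ y ∈ s ∨ (c = true ∧ y = v) := by
  cases c <;> simp [PySem.Set.mem_add]

set_option maxHeartbeats 1000000 in
lemma mem_pvStep (s : PySem.Set String) (lb y : String) :
    y ∈ pvStep s lb ↔ y ∈ s ∨ pvCond lb y := by
  simp [pvStep, pvKeywords, mem_add_if, pvCond, or_assoc]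

set_option maxHeartbeats 1000000 in
lemma mem_foldl_pvStep (labels : List String) (s : PySem.Set String) (y : String) :
    y ∈ labels.foldl pvStep s ↔ y ∈ s ∨ ∃ lb ∈ labels, pvCond lb y := by
  induction labels generalizing s with
  | nil => simp
  | cons x xs ih =>
      rw [List.foldl_cons, ih, mem_pvStep]
      simp [or_assoc]

lemma contains_collect (labels : List String) (y : String) :
    PySem.Set.contains (labels.foldl pvStep PySem.Set.empty) y = true ↔
      ∃ lb ∈ labels, pvCond lb y := by
  rw [PySem.Set.contains_iff, mem_foldl_pvStep]
  simp [PySem.Set.empty]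

lemma contains_bug (labels : List String) :
    PySem.Set.contains (labels.foldl pvStep PySem.Set.empty) "bug" =
      labels.any (fun lb => PySem.Str.isIn "bug" (PySem.Str.lower lb)) := by
  rw [Bool.eq_iff_iff, contains_collect, List.any_eq_true]; simp [pvCond]

lemma contains_security (labels : List String) :
    PySem.Set.contains (labels.foldl pvStep PySem.Set.empty) "security" =
      labels.any (fun lb => PySem.Str.isIn "security" (PySem.Str.lower lb)) := by
  rw [Bool.eq_iff_iff, contains_collect, List.any_eq_true]; simp [pvCond]

lemma contains_docs (labels : List String) :
    PySem.Set.contains (labels.foldl pvStep PySem.Set.empty) "docs" =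
      labels.any (fun lb => PySem.Str.isIn "doc" (PySem.Str.lower lb)) := by
  rw [Bool.eq_iff_iff, contains_collect, List.any_eq_true]; simp [pvCond]

lemma contains_enh (labels : List String) :
    PySem.Set.contains (labels.foldl pvStep PySem.Set.empty) "enhancement" =
      labels.any (fun lb => PySem.Str.isIn "enhancement" (PySem.Str.lower lb) || PySem.Str.isIn "feature" (PySem.Str.lower lb)) := by
  rw [Bool.eq_iff_iff, contains_collect, List.any_eq_true]; simp [pvCond]

lemma contains_td (labels : List String) :
    PySem.Set.contains (labels.foldl pvStep PySem.Set.empty) "tech-debt" =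
      labels.any (fun lb => PySem.Str.isIn "tech-debt" (PySem.Str.lower lb) || PySem.Str.isIn "refactor" (PySem.Str.lower lb)) := by
  rw [Bool.eq_iff_iff, contains_collect, List.any_eq_true]; simp [pvCond]

-- ===== VERDICT (by name: the statement is the Claim_ definition above) =====
theorem infer_issue_category_py_spec : Claim_equal_infer_issue_category_py := by
  intro labels _
  unfold Spec_infer_issue_category_py infer_issue_category_py infer_issue_category_py_alt
  simp only [pvPriority, pvResolve, contains_bug, contains_security, contains_docs,
    contains_enh, contains_td, List.any_map, Function.comp_def]
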